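-- pv_equiv track=rewrite | github.com/jmlee0527/coding_test | baekjoon/test.py | solution
-- ===== SOURCE A (Python) =====
-- def solution(survey, choices):
--     answer =""
--     type = ["R","T","C","F","J","M","A","N"]
--     result = [0] * 8
--
--     for i in range(len(survey)):
--         if choices[i] < 4:
--             result[type.index(survey[i][0])]+= (4-choices[i])
--         elif choices[i] >4:
--             result[type.index(survey[i][1])] += (choices[i]-4)
--         else:
--             continue
--
--     for i in range(0,7,2):
--         if result[i] < result[i+1]:
--             answer += type[i+1]
--         else:
--             answer += type[i]
--
--     return answer
-- ===== SOURCE B (Python) =====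
-- def solution(survey, choices):
--     def score(letter):
--         return sum(4 - c for s, c in zip(survey, choices) if c < 4 and s[0] == letter) \
--              + sum(c - 4 for s, c in zip(survey, choices) if c > 4 and s[1] == letter)
--     return "".join(p if score(p) >= score(q) else q
--                    for p, q in (("R", "T"), ("C", "F"), ("J", "M"), ("A", "N")))
-- ===== Notes on version B (the rewrite author's own statement) =====
-- stated objective: alternative
-- what changed: A's single pass mutating an 8-slot counter list addressed through list.index is replaced by a stateless per-letter formulation: each letter's score is a filtered sum recomputed over the zipped input, and the answer is assembled by comparing the two scores of each pair directly (>= keeps the first letter, matching A's tie rule).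
import Mathlib
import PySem

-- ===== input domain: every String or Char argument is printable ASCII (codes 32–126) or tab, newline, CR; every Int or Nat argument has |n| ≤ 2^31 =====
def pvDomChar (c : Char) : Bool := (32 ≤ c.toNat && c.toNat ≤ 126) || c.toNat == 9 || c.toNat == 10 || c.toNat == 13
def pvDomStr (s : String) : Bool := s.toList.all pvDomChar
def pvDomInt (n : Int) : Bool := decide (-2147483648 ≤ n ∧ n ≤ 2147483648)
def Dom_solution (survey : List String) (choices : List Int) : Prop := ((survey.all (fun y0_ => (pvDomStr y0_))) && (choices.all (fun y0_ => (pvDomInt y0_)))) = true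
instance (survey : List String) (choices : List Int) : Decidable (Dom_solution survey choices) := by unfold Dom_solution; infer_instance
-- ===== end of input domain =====

-- B replaces A's single pass mutating an 8-counter list (addressed via list.index) by a
-- stateless per-letter formulation: each letter's score is a filtered sum recomputed over
-- the zipped input, and each pair is decided by comparing its two scores; objective: alternative.

-- ===== PORT A =====
-- Python's `type` entries and survey[i][k] are 1-char strings; both are Char here (exact).
def pvTypeA : List Char := ['R', 'T', 'C', 'F', 'J', 'M', 'A', 'N']

def pvStepA (result : List Int) (s : String) (c : Int) : List Int :=
  if c < 4 then
    match (PySem.Str.pyGet? s 0).bind (fun ch => PySem.List.index? pvTypeA ch) with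
    | some j => result.set j (result.getD j 0 + (4 - c))
    | none => result
  else if c > 4 then
    match (PySem.Str.pyGet? s 1).bind (fun ch => PySem.List.index? pvTypeA ch) with
    | some j => result.set j (result.getD j 0 + (c - 4))
    | none => result
  else result

def solution (survey : List String) (choices : List Int) : String :=
  let result : List Int := List.replicate 8 0
  let result := (PySem.List.pyRange 0 survey.length 1).foldl
    (fun r i => pvStepA r (PySem.List.pyGetD survey i "") (PySem.List.pyGetD choices i 0)) result
  (PySem.List.pyRange 0 7 2).foldl
    (fun answer i =>
      if PySem.List.pyGetD result i 0 < PySem.List.pyGetD result (i + 1) 0 then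
        answer.push (PySem.List.pyGetD pvTypeA (i + 1) ' ')
      else
        answer.push (PySem.List.pyGetD pvTypeA i ' ')) ""

-- ===== PORT B =====
-- score(letter): two filtered generator sums over zip(survey, choices).
def pvScoreB (ps : List (String × Int)) (letter : Char) : Int :=
  ((ps.filter (fun p => decide (p.2 < 4) && ((PySem.Str.pyGet? p.1 0).getD ' ' == letter))).map
      (fun p => 4 - p.2)).sum
  + ((ps.filter (fun p => decide (p.2 > 4) && ((PySem.Str.pyGet? p.1 1).getD ' ' == letter))).map
      (fun p => p.2 - 4)).sum

def solution_alt (survey : List String) (choices : List Int) : String :=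
  let ps := survey.zip choices
  String.mk ([('R', 'T'), ('C', 'F'), ('J', 'M'), ('A', 'N')].map
    (fun pq => if pvScoreB ps pq.1 ≥ pvScoreB ps pq.2 then pq.1 else pq.2))

-- ===== PRECONDITION & SPEC =====
-- Pre_ excludes exactly the inputs on which the Python A raises: choices shorter than
-- survey (IndexError), a survey entry too short for the needed letter (IndexError),
-- or a needed letter outside "RTCFJMAN" (ValueError from list.index).
def Pre_solution (survey : List String) (choices : List Int) : Prop :=
  survey.length ≤ choices.length ∧
  ∀ p ∈ survey.zip choices,
    (p.2 < 4 → ((PySem.Str.pyGet? p.1 0).getD ' ') ∈ pvTypeA) ∧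
    (p.2 > 4 → ((PySem.Str.pyGet? p.1 1).getD ' ') ∈ pvTypeA)
instance (survey : List String) (choices : List Int) : Decidable (Pre_solution survey choices) := by
  unfold Pre_solution; infer_instance

def pvWitness_solution : List String × List Int := (["RT", "CF", "JM", "AN"], [1, 5, 4, 7])

def Spec_solution (survey : List String) (choices : List Int) (out : String) : Prop := out = solution_alt survey choices
instance (survey : List String) (choices : List Int) (out : String) : Decidable (Spec_solution survey choices out) := by unfold Spec_solution; infer_instance

-- ===== CLAIM =====
def Claim_equal_solution : Prop := ∀ (survey : List String) (choices : List Int), Dom_solution survey choices → Pre_solution survey choices → Spec_solution survey choices (solution survey choices)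

-- ===== LEMMAS AND PROOFS =====

theorem pv_foldl_range_eq_zip {β : Type} (f : β → String → Int → β)
    (sv : List String) (cs : List Int) (hlen : sv.length ≤ cs.length) (init : β) :
    (PySem.List.pyRange 0 sv.length 1).foldl
      (fun acc i => f acc (PySem.List.pyGetD sv i "") (PySem.List.pyGetD cs i 0)) init
    = (sv.zip cs).foldl (fun acc p => f acc p.1 p.2) init := by
  have hzl : (sv.zip cs).length = sv.length := by
    simp [List.length_zip]; omega
  have h1 : (PySem.List.pyRange 0 sv.length 1).foldl
      (fun acc i => f acc (PySem.List.pyGetD sv i "") (PySem.List.pyGetD cs i 0)) init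
    = (PySem.List.pyRange 0 sv.length 1).foldl
      (fun acc i => (fun (acc : β) (p : String × Int) => f acc p.1 p.2) acc (PySem.List.pyGetD (sv.zip cs) i ("", 0))) init := by
    apply PySem.List.foldl_congr_mem
    intro acc i hi
    rw [PySem.List.mem_pyRange_one] at hi
    obtain ⟨h0, hlt⟩ := hi
    have hi1 : i.toNat < sv.length := by omega
    have hi2 : i.toNat < cs.length := by omega
    rw [PySem.List.pyGetD_eq_getElem _ _ h0 (by omega),
        PySem.List.pyGetD_eq_getElem _ _ h0 (by omega),
        PySem.List.pyGetD_eq_getElem _ _ h0 (by omega)]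
    simp [List.getElem_zip]
  rw [h1]
  have h2 := PySem.List.foldl_pyRange_zero_pyGetD (sv.zip cs) ("", 0)
      (fun (acc : β) (p : String × Int) => f acc p.1 p.2) init
  rw [← hzl]
  simpa [PySem.List.len] using h2

-- contribution of one survey entry to one letter's score
def pvContrib (s : String) (c : Int) (L : Char) : Int :=
  (if c < 4 ∧ (PySem.Str.pyGet? s 0).getD ' ' = L then 4 - c else 0)
  + (if c > 4 ∧ (PySem.Str.pyGet? s 1).getD ' ' = L then c - 4 else 0)

theorem pvScoreB_nil (L : Char) : pvScoreB [] L = 0 := rfl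

theorem pv_cond_eq (c4 : Prop) [Decidable c4] (x L : Char) :
    (decide c4 && (x == L)) = decide (c4 ∧ x = L) := by
  by_cases h : c4 <;> by_cases h2 : x = L <;> simp [h, h2]

theorem pvScoreB_cons (s : String) (c : Int) (ps : List (String × Int)) (L : Char) :
    pvScoreB ((s, c) :: ps) L = pvContrib s c L + pvScoreB ps L := by
  simp only [pvScoreB, pvContrib, List.filter_cons, pv_cond_eq]
  by_cases h1 : c < 4 ∧ (PySem.Str.pyGet? s 0).getD ' ' = L <;>
  by_cases h2 : c > 4 ∧ (PySem.Str.pyGet? s 1).getD ' ' = L <;>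
    simp only [h1, h2, and_self, decide_true, decide_false, Bool.false_eq_true,
      if_true, if_false, List.map_cons, List.sum_cons] <;>
    first
    | (obtain ⟨ha, _⟩ := h1; obtain ⟨hb, _⟩ := h2; omega)
    | ring

theorem pvIdxR : List.idxOf? 'R' pvTypeA = some 0 := by decide
theorem pvIdxT : List.idxOf? 'T' pvTypeA = some 1 := by decide
theorem pvIdxC : List.idxOf? 'C' pvTypeA = some 2 := by decide
theorem pvIdxF : List.idxOf? 'F' pvTypeA = some 3 := by decide
theorem pvIdxJ : List.idxOf? 'J' pvTypeA = some 4 := by decide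
theorem pvIdxM : List.idxOf? 'M' pvTypeA = some 5 := by decide
theorem pvIdxA : List.idxOf? 'A' pvTypeA = some 6 := by decide
theorem pvIdxN : List.idxOf? 'N' pvTypeA = some 7 := by decide

theorem pv_pre_contrib (s : String) (c : Int)
    (hp : (c < 4 → ((PySem.Str.pyGet? s 0).getD ' ') ∈ pvTypeA) ∧
          (c > 4 → ((PySem.Str.pyGet? s 1).getD ' ') ∈ pvTypeA)) :
    ∀ (r0 r1 r2 r3 r4 r5 r6 r7 : Int),
    pvStepA [r0, r1, r2, r3, r4, r5, r6, r7] s c =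
      [r0 + pvContrib s c 'R', r1 + pvContrib s c 'T', r2 + pvContrib s c 'C',
       r3 + pvContrib s c 'F', r4 + pvContrib s c 'J', r5 + pvContrib s c 'M',
       r6 + pvContrib s c 'A', r7 + pvContrib s c 'N'] := by
  intro r0 r1 r2 r3 r4 r5 r6 r7
  by_cases h4 : c < 4
  · have hch := hp.1 h4
    cases h : PySem.Str.pyGet? s 0 with
    | none => rw [h] at hch; exact absurd hch (by decide)
    | some ch =>
      rw [h] at hch
      simp only [Option.getD_some] at hch
      have h2 : PySem.List.pyGet? s.toList 0 = some ch := by simpa using h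
      have hng : ¬ c > 4 := by omega
      fin_cases hch <;>
        simp [pvStepA, pvContrib, h2, h4, hng, PySem.List.index?, pvIdxR, pvIdxT, pvIdxC, pvIdxF, pvIdxJ, pvIdxM, pvIdxA, pvIdxN, List.getD]
  · by_cases h7 : c > 4
    · have hch := hp.2 h7
      cases h : PySem.Str.pyGet? s 1 with
      | none => rw [h] at hch; exact absurd hch (by decide)
      | some ch =>
        rw [h] at hch
        simp only [Option.getD_some] at hch
        have h2 : PySem.List.pyGet? s.toList 1 = some ch := by simpa using h
        fin_cases hch <;>
          simp [pvStepA, pvContrib, h2, h4, h7, PySem.List.index?, pvIdxR, pvIdxT, pvIdxC, pvIdxF, pvIdxJ, pvIdxM, pvIdxA, pvIdxN, List.getD]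
    · simp [pvStepA, pvContrib, h4, h7]

theorem pv_loop_inv (ps : List (String × Int)) :
    ∀ (r0 r1 r2 r3 r4 r5 r6 r7 : Int),
    (∀ p ∈ ps, (p.2 < 4 → ((PySem.Str.pyGet? p.1 0).getD ' ') ∈ pvTypeA) ∧
               (p.2 > 4 → ((PySem.Str.pyGet? p.1 1).getD ' ') ∈ pvTypeA)) →
    ps.foldl (fun r p => pvStepA r p.1 p.2) [r0, r1, r2, r3, r4, r5, r6, r7]
      = [r0 + pvScoreB ps 'R', r1 + pvScoreB ps 'T', r2 + pvScoreB ps 'C',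
         r3 + pvScoreB ps 'F', r4 + pvScoreB ps 'J', r5 + pvScoreB ps 'M',
         r6 + pvScoreB ps 'A', r7 + pvScoreB ps 'N'] := by
  induction ps with
  | nil => intro r0 r1 r2 r3 r4 r5 r6 r7 _; simp [pvScoreB_nil]
  | cons p ps ih =>
    intro r0 r1 r2 r3 r4 r5 r6 r7 hpre
    obtain ⟨s, c⟩ := p
    have hstep := pv_pre_contrib s c (hpre (s, c) (by simp)) r0 r1 r2 r3 r4 r5 r6 r7
    simp only [List.foldl_cons, hstep]
    rw [ih _ _ _ _ _ _ _ _ (fun q hq => hpre q (by simp [hq]))]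
    simp only [pvScoreB_cons]
    ring_nf

-- ===== VERDICT =====
set_option maxHeartbeats 1000000 in
theorem solution_spec : Claim_equal_solution := by
  intro survey choices _ hpre
  obtain ⟨hlen, hall⟩ := hpre
  unfold Spec_solution
  simp only [solution, solution_alt]
  rw [pv_foldl_range_eq_zip pvStepA survey choices hlen]
  have hrep : (List.replicate 8 (0 : Int)) = [0, 0, 0, 0, 0, 0, 0, 0] := by decide
  rw [hrep, pv_loop_inv (survey.zip choices) 0 0 0 0 0 0 0 0 hall]
  have hr : PySem.List.pyRange 0 7 2 = [0, 2, 4, 6] := by decide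
  rw [hr]
  simp only [List.foldl_cons, List.foldl_nil, List.map_cons, List.map_nil, zero_add]
  generalize pvScoreB (survey.zip choices) 'R' = sR
  generalize pvScoreB (survey.zip choices) 'T' = sT
  generalize pvScoreB (survey.zip choices) 'C' = sC
  generalize pvScoreB (survey.zip choices) 'F' = sF
  generalize pvScoreB (survey.zip choices) 'J' = sJ
  generalize pvScoreB (survey.zip choices) 'M' = sM
  generalize pvScoreB (survey.zip choices) 'A' = sA
  generalize pvScoreB (survey.zip choices) 'N' = sN
  rw [show PySem.List.pyGetD [sR, sT, sC, sF, sJ, sM, sA, sN] 0 0 = sR from rfl,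
      show PySem.List.pyGetD [sR, sT, sC, sF, sJ, sM, sA, sN] 1 0 = sT from rfl,
      show PySem.List.pyGetD [sR, sT, sC, sF, sJ, sM, sA, sN] 2 0 = sC from rfl,
      show PySem.List.pyGetD [sR, sT, sC, sF, sJ, sM, sA, sN] (2 + 1) 0 = sF from rfl,
      show PySem.List.pyGetD [sR, sT, sC, sF, sJ, sM, sA, sN] 4 0 = sJ from rfl,
      show PySem.List.pyGetD [sR, sT, sC, sF, sJ, sM, sA, sN] (4 + 1) 0 = sM from rfl,
      show PySem.List.pyGetD [sR, sT, sC, sF, sJ, sM, sA, sN] 6 0 = sA from rfl,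
      show PySem.List.pyGetD [sR, sT, sC, sF, sJ, sM, sA, sN] (6 + 1) 0 = sN from rfl]
  simp only [show ∀ a b : Int, (a ≥ b) = ¬ a < b from fun a b => propext (by omega)]
  split_ifs <;> rfl
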